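-- pv_equiv track=rewrite | github.com/OpenBB-finance/OpenBB | openbb_terminal/jupyter/widget_helpers.py | tablinks
-- ===== SOURCE A (Python) =====
-- def tablinks(tabs):
--     htmlcode = '<div class="tab">'
--     for idx, tab in enumerate(tabs):
--         htmlcode += f"""<button class="tablinks" onclick="menu(event, '{tab}')">{tab}</button>"""
--         if ((idx + 1) % 5) == 0:
--             htmlcode += "</br>"
--     htmlcode += "</div>"
--     return htmlcode
-- ===== SOURCE B (Python) =====
-- def tablinks(tabs):
--     rows = []
--     for i in range(0, len(tabs), 5):
--         chunk = tabs[i:i + 5]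
--         row = "".join(
--             f"""<button class="tablinks" onclick="menu(event, '{tab}')">{tab}</button>"""
--             for tab in chunk
--         )
--         if len(chunk) == 5:
--             row += "</br>"
--         rows.append(row)
--     return '<div class="tab">' + "".join(rows) + "</div>"
-- ===== Notes on version B (the rewrite author's own statement) =====
-- stated objective: alternative
-- what changed: Replaces A's flat enumerate loop with a modulo-5 counter by an outer loop over row chunks of five (tabs[i:i+5]) whose rows are joined, appending the row break exactly after each full chunk.
import Mathlib
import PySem

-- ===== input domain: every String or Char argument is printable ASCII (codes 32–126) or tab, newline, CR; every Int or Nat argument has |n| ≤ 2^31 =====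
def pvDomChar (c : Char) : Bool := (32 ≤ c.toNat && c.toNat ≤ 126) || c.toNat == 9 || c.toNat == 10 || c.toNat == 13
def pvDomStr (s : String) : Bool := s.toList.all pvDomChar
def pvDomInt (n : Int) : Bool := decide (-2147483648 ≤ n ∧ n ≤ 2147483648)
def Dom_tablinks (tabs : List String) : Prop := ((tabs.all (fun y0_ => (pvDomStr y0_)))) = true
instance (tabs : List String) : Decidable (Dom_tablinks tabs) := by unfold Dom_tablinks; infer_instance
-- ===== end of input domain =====

-- B rebuilds the tab bar row by row (chunks of five, joined) instead of A's flat
-- enumerate loop with a modulo-5 counter; same output, same O(n) cost (objective: alternative).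

-- ===== PORT A =====
-- the f-string both Pythons use for one button
def tabButton (tab : String) : String :=
  "<button class=\"tablinks\" onclick=\"menu(event, '" ++ tab ++ "')\">" ++ tab ++ "</button>"

-- A's 'for idx, tab in enumerate(tabs)' loop, carrying idx and the accumulated htmlcode
def tablinksLoop (idx : Int) (htmlcode : String) : List String → String
  | [] => htmlcode
  | tab :: rest =>
      let h1 := htmlcode ++ tabButton tab
      let h2 := if PySem.Int.mod (idx + 1) 5 == 0 then h1 ++ "</br>" else h1
      tablinksLoop (idx + 1) h2 rest

def tablinks (tabs : List String) : String :=
  tablinksLoop 0 "<div class=\"tab\">" tabs ++ "</div>"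

-- ===== PORT B =====
-- B's outer loop over chunks tabs[i:i+5]: each row is ''.join of its buttons,
-- plus '</br>' exactly when the chunk is full
def tablinksRows : List String → String
  | [] => ""
  | t :: ts =>
      let chunk := t :: ts.take 4
      let row := PySem.Str.join "" (chunk.map tabButton)
      let row2 := if chunk.length == 5 then row ++ "</br>" else row
      row2 ++ tablinksRows (ts.drop 4)
termination_by l => l.length
decreasing_by simp

def tablinks_alt (tabs : List String) : String :=
  "<div class=\"tab\">" ++ tablinksRows tabs ++ "</div>"

-- ===== CLAIM (what is proved, stated in full; the proofs are below) =====
def Spec_tablinks (tabs : List String) (out : String) : Prop := out = tablinks_alt tabs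
instance (tabs : List String) (out : String) : Decidable (Spec_tablinks tabs out) := by unfold Spec_tablinks; infer_instance

def Claim_equal_tablinks : Prop := ∀ (tabs : List String), Dom_tablinks tabs → Spec_tablinks tabs (tablinks tabs)

-- ===== LEMMAS AND PROOFS =====
theorem join_empty_cons (a : String) (l : List String) :
    PySem.Str.join "" (a :: l) = a ++ PySem.Str.join "" l := by
  cases l with
  | nil =>
    simp [PySem.Str.join, PySem.Chars.join_singleton, PySem.Chars.join_nil]
  | cons b rest =>
    simp only [PySem.Str.join, List.map_cons]
    rw [show ("" : String).toList = ([] : List Char) from rfl,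
      PySem.Chars.join_cons_cons, List.append_nil, String.ofList_append]
    simp

theorem join_empty_nil : PySem.Str.join "" ([] : List String) = "" := by
  simp [PySem.Str.join, PySem.Chars.join, List.intercalate]

theorem loop_eq_rows (ts : List String) : ∀ (k : Int) (acc : String),
    tablinksLoop (5 * k) acc ts = acc ++ tablinksRows ts := by
  induction ts using tablinksRows.induct with
  | case1 => intro k acc; simp [tablinksLoop, tablinksRows]
  | case2 t ts ih =>
    intro k acc
    match ts with
    | [] =>
      simp only [tablinksLoop, tablinksRows, List.take, List.drop, List.map,
        List.length, join_empty_cons, join_empty_nil, beq_iff_eq,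
        PySem.Int.mod_eq_zero_iff_dvd]
      rw [if_neg (by omega : ¬ (5:Int) ∣ 5*k+1)]
      simp
    | [b] =>
      simp only [tablinksLoop, tablinksRows, List.take, List.drop, List.map,
        List.length, join_empty_cons, join_empty_nil, beq_iff_eq,
        PySem.Int.mod_eq_zero_iff_dvd]
      rw [if_neg (by omega : ¬ (5:Int) ∣ 5*k+1), if_neg (by omega : ¬ (5:Int) ∣ 5*k+1+1)]
      simp [String.append_assoc]
    | [b, c] =>
      simp only [tablinksLoop, tablinksRows, List.take, List.drop, List.map,
        List.length, join_empty_cons, join_empty_nil, beq_iff_eq,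
        PySem.Int.mod_eq_zero_iff_dvd]
      rw [if_neg (by omega : ¬ (5:Int) ∣ 5*k+1), if_neg (by omega : ¬ (5:Int) ∣ 5*k+1+1),
        if_neg (by omega : ¬ (5:Int) ∣ 5*k+1+1+1)]
      simp [String.append_assoc]
    | [b, c, d] =>
      simp only [tablinksLoop, tablinksRows, List.take, List.drop, List.map,
        List.length, join_empty_cons, join_empty_nil, beq_iff_eq,
        PySem.Int.mod_eq_zero_iff_dvd]
      rw [if_neg (by omega : ¬ (5:Int) ∣ 5*k+1), if_neg (by omega : ¬ (5:Int) ∣ 5*k+1+1),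
        if_neg (by omega : ¬ (5:Int) ∣ 5*k+1+1+1), if_neg (by omega : ¬ (5:Int) ∣ 5*k+1+1+1+1)]
      simp [String.append_assoc]
    | b :: c :: d :: e :: rest =>
      simp only [tablinksLoop, tablinksRows, List.take, List.drop, List.map,
        List.length, join_empty_cons, join_empty_nil, beq_iff_eq,
        PySem.Int.mod_eq_zero_iff_dvd]
      rw [if_neg (by omega : ¬ (5:Int) ∣ 5*k+1), if_neg (by omega : ¬ (5:Int) ∣ 5*k+1+1),
        if_neg (by omega : ¬ (5:Int) ∣ 5*k+1+1+1), if_neg (by omega : ¬ (5:Int) ∣ 5*k+1+1+1+1),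
        if_pos (by omega : (5:Int) ∣ 5*k+1+1+1+1+1),
        show (5*k+1+1+1+1+1 : Int) = 5*(k+1) by ring]
      simp only [List.drop] at ih
      rw [ih (k+1)]
      simp [String.append_assoc]

-- ===== VERDICT (by name: the statement is the Claim_ definition above) =====
theorem tablinks_spec : Claim_equal_tablinks := by
  intro tabs _
  unfold Spec_tablinks tablinks tablinks_alt
  have := loop_eq_rows tabs 0 "<div class=\"tab\">"
  simpa using congrArg (· ++ "</div>") (by simpa using this)
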